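-- pv_equiv track=rewrite | github.com/serverand67/repoz_python_homework_7_05_10_23 | task3.py | len_list
-- ===== SOURCE A (Python) =====
-- def len_list(list1, list2):
--     if len(list2) > len(list1):
--         temp = len(list1)
--         for i in range(len(list2)):
--             if i > len(list1) - 1:
--                 list1.append(list1[i % temp])
--     elif len(list2) < len(list1):
--         temp = len(list2)
--         for i in range(len(list1)):
--             if i > len(list2) - 1:
--                 list2.append(list2[i % temp])
--     return list1, list2
-- ===== SOURCE B (Python) =====
-- def len_list(list1, list2):
--     if len(list1) == len(list2):
--         return list1, list2
--     if len(list1) < len(list2):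
--         missing = len(list2) - len(list1)
--         copies = (missing + len(list1) - 1) // len(list1)
--         list1.extend((list1 * copies)[:missing])
--     else:
--         missing = len(list1) - len(list2)
--         copies = (missing + len(list2) - 1) // len(list2)
--         list2.extend((list2 * copies)[:missing])
--     return list1, list2
-- ===== Notes on version B (the rewrite author's own statement) =====
-- stated objective: idiomatic
-- what changed: Replaces the per-element loop (append shorter[i % temp] once per index of the longer list, re-checking lengths each iteration) by one bulk step: compute the missing count, build ceil(missing/L) whole copies of the shorter list and extend it with the first `missing` elements of that slice.
import Mathlib
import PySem

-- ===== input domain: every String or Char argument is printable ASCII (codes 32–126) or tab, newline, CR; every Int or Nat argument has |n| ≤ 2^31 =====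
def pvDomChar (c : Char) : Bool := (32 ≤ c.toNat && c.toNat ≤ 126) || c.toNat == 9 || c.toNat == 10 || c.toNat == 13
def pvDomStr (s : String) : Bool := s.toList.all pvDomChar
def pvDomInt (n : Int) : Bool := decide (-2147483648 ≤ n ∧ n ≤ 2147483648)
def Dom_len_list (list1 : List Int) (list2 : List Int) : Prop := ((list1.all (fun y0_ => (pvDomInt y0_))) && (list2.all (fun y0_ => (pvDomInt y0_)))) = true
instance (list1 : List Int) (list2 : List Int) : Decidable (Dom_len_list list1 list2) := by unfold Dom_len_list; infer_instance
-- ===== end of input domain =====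

-- B pads the shorter list in one bulk extend (ceil(missing/L) copies, sliced) instead of A's
-- per-element cyclic appends; both mutate the shorter argument in place in Python — the
-- equivalence proved here is about the return value.

-- ===== PORT A =====
-- one loop step: append list1[i % temp] when i > len(list1) - 1 (lengths read from the CURRENT list)
def lenListStep (temp : Nat) (acc : List Int) (i : Nat) : List Int :=
  if (i : Int) > (acc.length : Int) - 1 then
    acc ++ [(PySem.List.pyGet? acc ((i % temp : Nat) : Int)).getD 0]
  else acc

def len_list (list1 : List Int) (list2 : List Int) : List Int × List Int :=
  if list2.length > list1.length then
    let temp := list1.length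
    ((List.range list2.length).foldl (lenListStep temp) list1, list2)
  else if list2.length < list1.length then
    let temp := list2.length
    (list1, (List.range list1.length).foldl (lenListStep temp) list2)
  else (list1, list2)

-- ===== PORT B =====
-- list * copies (Python list repetition)
def lenListRep (l : List Int) : Nat → List Int
  | 0 => []
  | n + 1 => l ++ lenListRep l n

def len_list_alt (list1 : List Int) (list2 : List Int) : List Int × List Int :=
  if list1.length = list2.length then (list1, list2)
  else if list1.length < list2.length then
    let missing := list2.length - list1.length
    let copies := (missing + list1.length - 1) / list1.length
    (list1 ++ (lenListRep list1 copies).take missing, list2)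
  else
    let missing := list1.length - list2.length
    let copies := (missing + list2.length - 1) / list2.length
    (list1, list2 ++ (lenListRep list2 copies).take missing)

-- ===== PRECONDITION & SPEC =====
-- Pre_ excludes exactly the inputs where A raises ZeroDivisionError (i % 0): the shorter list
-- is empty while the lengths differ.
def Pre_len_list (list1 : List Int) (list2 : List Int) : Prop :=
  list1.length = list2.length ∨ (list1 ≠ [] ∧ list2 ≠ [])
instance (list1 : List Int) (list2 : List Int) : Decidable (Pre_len_list list1 list2) := by unfold Pre_len_list; infer_instance

def pvWitness_len_list : List Int × List Int := ([1, 2], [5, 6, 7, 8, 9])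

def Spec_len_list (list1 : List Int) (list2 : List Int) (out : List Int × List Int) : Prop := out = len_list_alt list1 list2
instance (list1 : List Int) (list2 : List Int) (out : List Int × List Int) : Decidable (Spec_len_list list1 list2 out) := by unfold Spec_len_list; infer_instance

-- ===== CLAIM (what is proved, stated in full; the proofs are below) =====
def Claim_equal_len_list : Prop := ∀ (list1 : List Int) (list2 : List Int), Dom_len_list list1 list2 → Pre_len_list list1 list2 → Spec_len_list list1 list2 (len_list list1 list2)

-- ===== LEMMAS AND PROOFS =====

-- the cyclic prefix of length n of list l
def lenListCyc (l : List Int) (n : Nat) : List Int :=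
  (List.range n).map (fun i => l.getD (i % l.length) 0)

lemma lenListCyc_self (l : List Int) : lenListCyc l l.length = l := by
  apply List.ext_getElem
  · simp [lenListCyc]
  · intro i h1 h2
    simp only [lenListCyc, List.getElem_map, List.getElem_range]
    simp [Nat.mod_eq_of_lt h2, List.getElem?_eq_getElem h2]

lemma lenListCyc_length (l : List Int) (n : Nat) : (lenListCyc l n).length = n := by
  simp [lenListCyc]

lemma lenListCyc_succ (l : List Int) (n : Nat) :
    lenListCyc l (n + 1) = lenListCyc l n ++ [l.getD (n % l.length) 0] := by
  simp [lenListCyc, List.range_succ]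

-- A's loop, started on l, computes the cyclic prefix of length (max l.length k)
lemma lenList_foldA (l : List Int) (hl : l ≠ []) (k : Nat) :
    (List.range k).foldl (lenListStep l.length) l = lenListCyc l (max l.length k) := by
  have hL : 0 < l.length := List.length_pos_iff.mpr hl
  induction k with
  | zero => simp [lenListCyc_self l]
  | succ k ih =>
    rw [List.range_succ, List.foldl_append, ih]
    simp only [List.foldl_cons, List.foldl_nil, lenListStep, lenListCyc_length]
    by_cases hk : k < l.length
    · have h1 : max l.length k = l.length := by omega
      have h2 : max l.length (k + 1) = l.length := by omega
      rw [h1, h2]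
      have : ¬ ((k : Int) > (l.length : Int) - 1) := by omega
      simp [this]
    · have h1 : max l.length k = k := by omega
      have h2 : max l.length (k + 1) = k + 1 := by omega
      rw [h1, h2]
      have hc : ((k : Int) > (k : Int) - 1) := by omega
      simp only [hc, if_pos]
      rw [lenListCyc_succ]
      congr 2
      have hlt : k % l.length < k := Nat.lt_of_lt_of_le (Nat.mod_lt _ hL) (by omega)
      rw [PySem.List.pyGet?_natCast]
      have heq : (lenListCyc l k)[k % l.length]? = some (l.getD ((k % l.length) % l.length) 0) := by
        simp [lenListCyc, hlt]
      rw [heq]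
      simp [Nat.mod_mod_of_dvd _ (dvd_refl _)]

-- taking a prefix of a cyclic prefix
lemma lenListCyc_take (l : List Int) (m n : Nat) (h : m ≤ n) :
    (lenListCyc l n).take m = lenListCyc l m := by
  unfold lenListCyc
  rw [← List.map_take, List.take_range, Nat.min_eq_left h]

-- splitting a long cyclic prefix after one full period
lemma lenListCyc_split (l : List Int) (n : Nat) (h : l.length ≤ n) :
    lenListCyc l n = l ++ lenListCyc l (n - l.length) := by
  conv_lhs => rw [show n = l.length + (n - l.length) by omega]
  unfold lenListCyc
  rw [List.range_add, List.map_append, List.map_map]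
  congr 1
  · exact lenListCyc_self l
  · apply List.map_congr_left
    intro i _
    simp [Nat.add_mod_left]

-- repetition is a cyclic prefix
lemma lenListRep_eq_cyc (l : List Int) (c : Nat) :
    lenListRep l c = lenListCyc l (c * l.length) := by
  induction c with
  | zero => simp [lenListRep, lenListCyc]
  | succ c ih =>
    show l ++ lenListRep l c = _
    rw [ih, lenListCyc_split l ((c + 1) * l.length) (Nat.le_mul_of_pos_left _ (by omega))]
    congr 2
    rw [Nat.succ_mul]
    omega

-- B's padded list equals the cyclic prefix of the full target length
lemma lenList_B_eq_cyc (l : List Int) (hl : l ≠ []) (n : Nat) (h : l.length < n) :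
    l ++ (lenListRep l ((n - l.length + l.length - 1) / l.length)).take (n - l.length)
      = lenListCyc l n := by
  have hL : 0 < l.length := List.length_pos_iff.mpr hl
  set m := n - l.length with hm
  set c := (m + l.length - 1) / l.length with hc
  have hmc : m ≤ c * l.length := by
    have h2 := Nat.div_add_mod (m + l.length - 1) l.length
    rw [← hc] at h2
    have h3 : c * l.length = l.length * c := Nat.mul_comm _ _
    have h4 := Nat.mod_lt (m + l.length - 1) hL
    omega
  rw [lenListRep_eq_cyc, lenListCyc_take l m _ hmc, lenListCyc_split l n (by omega)]

-- ===== VERDICT (by name: the statement is the Claim_ definition above) =====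
theorem len_list_spec : Claim_equal_len_list := by
  intro list1 list2 _ hpre
  unfold Spec_len_list len_list len_list_alt
  rcases Nat.lt_trichotomy list1.length list2.length with h | h | h
  · -- list2 longer: list1 nonempty by Pre_
    have hne : list1 ≠ [] := by
      rcases hpre with he | ⟨h1, _⟩
      · omega
      · exact h1
    have hgt : list2.length > list1.length := h
    rw [if_pos hgt, if_neg (by omega), if_pos h]
    simp only
    rw [lenList_foldA list1 hne, lenList_B_eq_cyc list1 hne list2.length h,
      Nat.max_eq_right (Nat.le_of_lt h)]
  · simp [h]
  · have hne : list2 ≠ [] := by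
      rcases hpre with he | ⟨_, h2⟩
      · omega
      · exact h2
    rw [if_neg (by omega), if_pos h, if_neg (by omega), if_neg (by omega)]
    simp only
    rw [lenList_foldA list2 hne, lenList_B_eq_cyc list2 hne list1.length h,
      Nat.max_eq_right (Nat.le_of_lt h)]
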